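-- pv_equiv track=rewrite | github.com/diogorn/uminho | LEI/3º ano/PL/TPC2/main.py | distobrasPeriodo
-- ===== SOURCE A (Python) =====
-- def distobrasPeriodo(data):
--     periodos = {}
--     for entrada in data:
--         periodo = entrada[3]
--         obra = entrada[0]
--         if periodo in periodos:
--             periodos[periodo].append(obra)
--         else:
--             periodos[periodo] = [obra]
--
--     for periodo in periodos:
--         periodos[periodo].sort()
--     return periodos
-- ===== SOURCE B (Python) =====
-- def distobrasPeriodo(data):
--     periodos = {entrada[3]: [] for entrada in data}
--     for entrada in sorted(data, key=lambda e: e[0]):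
--         periodos[entrada[3]].append(entrada[0])
--     return periodos
-- ===== Notes on version B (the rewrite author's own statement) =====
-- stated objective: alternative
-- what changed: B sorts the input once by the obra field and then groups in a single pass (keys pre-seeded by a dict comprehension to keep A's key order), instead of A's group-first-then-sort-each-group; no per-group sort remains.
import Mathlib
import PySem

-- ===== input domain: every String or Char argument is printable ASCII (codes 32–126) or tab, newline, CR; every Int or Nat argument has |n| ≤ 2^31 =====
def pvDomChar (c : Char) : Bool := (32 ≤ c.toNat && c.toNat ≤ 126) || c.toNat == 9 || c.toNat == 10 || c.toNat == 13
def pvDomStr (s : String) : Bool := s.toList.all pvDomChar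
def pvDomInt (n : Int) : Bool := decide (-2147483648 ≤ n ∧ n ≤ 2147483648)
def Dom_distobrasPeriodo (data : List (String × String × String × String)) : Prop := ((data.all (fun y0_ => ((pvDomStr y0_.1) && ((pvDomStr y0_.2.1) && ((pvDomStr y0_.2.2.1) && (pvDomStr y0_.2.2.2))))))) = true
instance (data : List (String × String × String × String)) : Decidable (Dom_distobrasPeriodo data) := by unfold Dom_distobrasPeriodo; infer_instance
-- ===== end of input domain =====

-- B groups after one global stable sort by the obra field (keys pre-seeded in A's key order), replacing A's per-group sorts; objective: alternative decomposition, same asymptotic cost.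

-- ===== PORT A =====
-- group loop: 'if periodo in periodos: append else: [obra]' is d[k] = d.get(k, []) + [obra] = Dict.modify;
-- second loop 'for periodo in periodos: periodos[periodo].sort()' sorts each value in place.
def distobrasPeriodo (data : List (String × String × String × String)) : List (String × List String) :=
  let periodos : PySem.Dict String (List String) :=
    data.foldl (fun d entrada => d.modify entrada.2.2.2 [] (fun l => l ++ [entrada.1])) PySem.Dict.empty
  (periodos.items.map (fun p => (p.1, PySem.List.sorted p.2 (fun x => x))))

-- ===== PORT B =====
def distobrasPeriodo_alt (data : List (String × String × String × String)) : List (String × List String) :=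
  let periodos : PySem.Dict String (List String) :=
    data.foldl (fun d entrada => d.insert entrada.2.2.2 []) PySem.Dict.empty
  let periodos :=
    (PySem.List.sorted data (fun e => e.1)).foldl
      (fun d entrada => d.modify entrada.2.2.2 [] (fun l => l ++ [entrada.1])) periodos
  periodos.items

-- ===== PRECONDITION & SPEC =====
def Spec_distobrasPeriodo (data : List (String × String × String × String)) (out : List (String × List String)) : Prop := out = distobrasPeriodo_alt data
instance (data : List (String × String × String × String)) (out : List (String × List String)) : Decidable (Spec_distobrasPeriodo data out) := by unfold Spec_distobrasPeriodo; infer_instance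

-- ===== CLAIM (what is proved, stated in full; the proofs are below) =====
def Claim_equal_distobrasPeriodo : Prop := ∀ (data : List (String × String × String × String)), Dom_distobrasPeriodo data → Spec_distobrasPeriodo data (distobrasPeriodo data)

-- ===== LEMMAS AND PROOFS =====

-- Set.update adds nothing when every element is already present
theorem set_update_of_subset {α : Type} [BEq α] [LawfulBEq α]
    (s : PySem.Set α) (xs : List α) (h : ∀ x ∈ xs, x ∈ s) : PySem.Set.update s xs = s := by
  induction xs generalizing s with
  | nil => rfl
  | cons x xs ih =>
      have hx : x ∈ s := h x (by simp)
      have h1 : PySem.Set.add s x = s := PySem.Set.add_of_mem hx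
      show PySem.Set.update s (x :: xs) = s
      simp only [PySem.Set.update, List.foldl_cons, h1]
      exact ih s (fun y hy => h y (List.mem_cons_of_mem _ hy))

-- a fold of 'insert k []' leaves every getD _ [] at []
theorem getD_foldl_insert_nil {β : Type} (l : List (String × String × String × String))
    (d : PySem.Dict String (List β)) (hd : ∀ c, d.getD c [] = []) (c : String) :
    (l.foldl (fun d e => d.insert e.2.2.2 []) d).getD c [] = [] := by
  induction l generalizing d with
  | nil => exact hd c
  | cons e l ih =>
      refine ih _ (fun c' => ?_)
      rw [PySem.Dict.getD_insert]
      split <;> simp [hd]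

theorem distobrasPeriodo_spec' (data : List (String × String × String × String)) :
    distobrasPeriodo data = distobrasPeriodo_alt data := by
  unfold distobrasPeriodo distobrasPeriodo_alt
  dsimp only
  set sd := PySem.List.sorted data (fun e => e.1) with hsd
  set gA : PySem.Dict String (List String) :=
    data.foldl (fun d entrada => d.modify entrada.2.2.2 [] (fun l => l ++ [entrada.1])) PySem.Dict.empty with hgA
  set d0 : PySem.Dict String (List String) :=
    data.foldl (fun d entrada => d.insert entrada.2.2.2 []) PySem.Dict.empty with hd0
  set gB : PySem.Dict String (List String) :=
    sd.foldl (fun d entrada => d.modify entrada.2.2.2 [] (fun l => l ++ [entrada.1])) d0 with hgB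
  -- keys
  have hkA : gA.keys = PySem.Set.update (PySem.Dict.empty : PySem.Dict String (List String)).keys (data.map (fun e => e.2.2.2)) := by
    rw [hgA]
    exact PySem.Dict.keys_foldl_modify_key data (fun e => e.2.2.2) [] (fun _ e l => l ++ [e.1]) _
  have hk0 : d0.keys = PySem.Set.update (PySem.Dict.empty : PySem.Dict String (List String)).keys (data.map (fun e => e.2.2.2)) := by
    rw [hd0]
    exact PySem.Dict.keys_foldl_insert_key data (fun e => e.2.2.2) (fun _ _ => []) _
  have hmem : ∀ x ∈ (data.map (fun e => e.2.2.2)), x ∈ PySem.Set.update (PySem.Dict.empty : PySem.Dict String (List String)).keys (data.map (fun e => e.2.2.2)) := by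
    intro x hx
    simpa [PySem.Dict.keys_empty] using (PySem.Set.mem_ofList (data.map (fun e => e.2.2.2)) x).mpr hx
  have hkB : gB.keys = gA.keys := by
    rw [hgB, PySem.Dict.keys_foldl_modify_key sd (fun e => e.2.2.2) [] (fun _ e l => l ++ [e.1]) d0,
        hk0, hkA]
    apply set_update_of_subset
    intro x hx
    apply hmem
    rcases List.mem_map.mp hx with ⟨e, he, rfl⟩
    exact List.mem_map.mpr ⟨e, (PySem.List.mem_sorted _ _ _ _).mp he, rfl⟩
  have hnodA : gA.keys.Nodup := by
    rw [hgA]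
    exact PySem.Dict.nodup_keys_foldl_modify_key data (fun e => e.2.2.2) [] (fun _ e l => l ++ [e.1]) _
      PySem.Dict.nodup_keys_empty
  have hnodB : gB.keys.Nodup := hkB ▸ hnodA
  -- values at any key c
  have hpair : ∀ (l : List (String × String × String × String)) (d : PySem.Dict String (List String)),
      l.foldl (fun d entrada => d.modify entrada.2.2.2 [] (fun v => v ++ [entrada.1])) d
        = (l.map (fun e => (e.2.2.2, e.1))).foldl (fun d p => d.modify p.1 [] (fun v => v ++ [p.2])) d := by
    intro l
    induction l with
    | nil => intro d; rfl
    | cons e l ih => intro d; simp only [List.foldl_cons, List.map_cons, ih]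
  have hvA : ∀ c, gA.getD c [] = (data.filter (fun e => e.2.2.2 == c)).map (fun e => e.1) := by
    intro c
    rw [hgA, hpair, PySem.Dict.getD_foldl_modify_append]
    simp [List.filter_map, List.map_map, Function.comp_def]
  have hv0 : ∀ c, d0.getD c [] = [] := by
    intro c
    rw [hd0]
    exact getD_foldl_insert_nil data _ (fun c => by simp [PySem.Dict.getD_empty]) c
  have hvB : ∀ c, gB.getD c [] = (sd.filter (fun e => e.2.2.2 == c)).map (fun e => e.1) := by
    intro c
    rw [hgB, hpair, PySem.Dict.getD_foldl_modify_append, hv0]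
    simp [List.filter_map, List.map_map, Function.comp_def]
  -- per-key: sorting A's group equals B's group
  have hval : ∀ c, PySem.List.sorted (gA.getD c []) (fun x => x)
      = gB.getD c [] := by
    intro c
    rw [hvA, hvB]
    apply PySem.List.sorted_id_eq_of_perm_of_pairwise
    · exact ((PySem.List.sorted_perm data (fun e => e.1) false).filter _).map _
    · have hp : List.Pairwise (fun a b => a.1 ≤ b.1) sd := PySem.List.sorted_pairwise data (fun e => e.1)
      exact List.pairwise_map.mpr (hp.filter _)
  -- assemble items
  rw [PySem.Dict.items_eq_map_keys gA hnodA [], PySem.Dict.items_eq_map_keys gB hnodB [],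
      List.map_map, hkB]
  refine List.map_congr_left (fun k _ => ?_)
  simp [hval k]

-- ===== VERDICT (by name: the statement is the Claim_ definition above) =====
theorem distobrasPeriodo_spec : Claim_equal_distobrasPeriodo := by
  intro data _
  exact distobrasPeriodo_spec' data
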